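-- pv_equiv track=rewrite | github.com/latikamehra/PythonProjects | CommonCodingProblems/TrimArrayForMaxMinCondition_Method1.py | validMinMax
-- ===== SOURCE A (Python) =====
-- def validMinMax(arr):
--     dicts = {}
--     sz = len(arr)
--
--     for i in range(0,sz) :
--         dicts[arr[i]] = None
--         for j in range(sz-1, i, -1) :
--             if arr[i]*2 >= arr[j] :
--                 dicts[arr[i]] = arr[j]
--                 break
--
--     return dicts
-- ===== SOURCE B (Python) =====
-- from bisect import bisect_left
--
-- def validMinMax(arr):
--     # One right-to-left pass. neg holds the negated values of the right-to-left
--     # strict minima of the suffix already seen, in ascending order; the rightmost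
--     # later element <= t is exactly the largest such minimum <= t, found by bisection.
--     n = len(arr)
--     ans = [None] * n
--     neg = []
--     for i in range(n - 1, -1, -1):
--         k = bisect_left(neg, -(2 * arr[i]))
--         if k < len(neg):
--             ans[i] = -neg[k]
--         if not neg or -arr[i] > neg[-1]:
--             neg.append(-arr[i])
--     out = {}
--     for i in range(n):
--         out[arr[i]] = ans[i]
--     return out
-- ===== Notes on version B (the rewrite author's own statement) =====
-- stated objective: faster
-- what changed: Replaces A's quadratic per-element backward scan with a single right-to-left pass maintaining the stack of suffix right-to-left minima, answering each 'rightmost later element <= 2*x' query by bisection on that stack.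
import Mathlib
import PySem

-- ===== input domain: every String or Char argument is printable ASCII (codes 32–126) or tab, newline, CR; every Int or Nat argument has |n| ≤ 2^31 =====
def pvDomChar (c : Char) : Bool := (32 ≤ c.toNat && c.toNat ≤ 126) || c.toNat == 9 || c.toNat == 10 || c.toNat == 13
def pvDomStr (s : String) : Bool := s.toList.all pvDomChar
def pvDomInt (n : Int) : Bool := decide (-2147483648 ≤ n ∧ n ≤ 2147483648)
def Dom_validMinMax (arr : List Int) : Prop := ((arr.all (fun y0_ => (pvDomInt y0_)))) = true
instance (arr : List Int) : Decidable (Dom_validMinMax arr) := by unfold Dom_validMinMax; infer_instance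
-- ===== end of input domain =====

-- B replaces A's per-element backward scan by one right-to-left pass over a stack of
-- suffix minima queried by binary search (objective: faster).

-- ===== PORT A =====
-- loop body of A's outer for-loop (every index accessed is in range, so pyGetD is exact)
def stepA (arr : List Int) (sz : Int) (dicts : PySem.Dict Int (Option Int)) (i : Int) :
    PySem.Dict Int (Option Int) :=
  let ai := PySem.List.pyGetD arr i 0
  let dicts := PySem.Dict.insert dicts ai none
  -- 'for j in range(sz-1, i, -1): if ai*2 >= arr[j]: dicts[ai] = arr[j]; break'
  match (PySem.List.pyRange (sz - 1) i (-1)).find?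
      (fun j => decide (ai * 2 ≥ PySem.List.pyGetD arr j 0)) with
  | some j => PySem.Dict.insert dicts ai (some (PySem.List.pyGetD arr j 0))
  | none => dicts

def validMinMax (arr : List Int) : List (Int × Option Int) :=
  let sz : Int := (arr.length : Int)
  ((PySem.List.pyRange 0 sz 1).foldl (stepA arr sz) PySem.Dict.empty).items

-- ===== PORT B =====
-- 'k = bisect_left(neg, -(2*a)); ans[i] = -neg[k] if k < len(neg)'
def bAnsOne (neg : List Int) (t : Int) : Option Int :=
  (PySem.List.pyGet? neg ((PySem.List.bisectLeft neg (-t) : Nat) : Int)).map (fun v => -v)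

-- 'if not neg or -a > neg[-1]: neg.append(-a)'
def bPush (neg : List Int) (a : Int) : List Int :=
  if (neg.getLast?).all (fun m => decide (m < -a)) then neg ++ [-a] else neg

-- Source B's loop 'for i in range(n-1, -1, -1)' as structural recursion from the right;
-- returns (ans, neg) for the processed suffix
def bGo : List Int → List (Option Int) × List Int
  | [] => ([], [])
  | a :: rest =>
      let p := bGo rest
      (bAnsOne p.2 (2 * a) :: p.1, bPush p.2 a)

def validMinMax_alt (arr : List Int) : List (Int × Option Int) :=
  -- 'for i in range(n): out[arr[i]] = ans[i]'
  ((arr.zip (bGo arr).1).foldl (fun d p => PySem.Dict.insert d p.1 p.2)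
    PySem.Dict.empty).items

-- ===== PRECONDITION & SPEC =====
def Spec_validMinMax (arr : List Int) (out : List (Int × Option Int)) : Prop := out = validMinMax_alt arr
instance (arr : List Int) (out : List (Int × Option Int)) : Decidable (Spec_validMinMax arr out) := by unfold Spec_validMinMax; infer_instance

-- ===== CLAIM (what is proved, stated in full; the proofs are below) =====
def Claim_equal_validMinMax : Prop := ∀ (arr : List Int), Dom_validMinMax arr → Spec_validMinMax arr (validMinMax arr)

-- ===== LEMMAS AND PROOFS =====

-- A's inner scan for outer index i, as an Option value
def ansAux (arr : List Int) (sz i : Int) : Option Int :=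
  Option.map (fun j => PySem.List.pyGetD arr j 0)
    ((PySem.List.pyRange (sz - 1) i (-1)).find?
      (fun j => decide (PySem.List.pyGetD arr i 0 * 2 ≥ PySem.List.pyGetD arr j 0)))

theorem stepA_eq (arr : List Int) (sz : Int) (d : PySem.Dict Int (Option Int)) (i : Int) :
    stepA arr sz d i = PySem.Dict.insert d (PySem.List.pyGetD arr i 0) (ansAux arr sz i) := by
  simp only [stepA, ansAux]
  cases hf : (PySem.List.pyRange (sz - 1) i (-1)).find?
      (fun j => decide (PySem.List.pyGetD arr i 0 * 2 ≥ PySem.List.pyGetD arr j 0)) with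
  | none => simp
  | some j => simp [PySem.Dict.insert_insert_self]

theorem bGo_fst_length (s : List Int) : (bGo s).1.length = s.length := by
  induction s with
  | nil => rfl
  | cons a rest ih => simp [bGo, ih]

theorem bGo_fst_getElem (s : List Int) (k : Nat) (hk : k < s.length) :
    (bGo s).1[k]'(by rw [bGo_fst_length]; exact hk)
      = bAnsOne (bGo (s.drop (k + 1))).2 (2 * s[k]) := by
  induction s generalizing k with
  | nil => simp at hk
  | cons a rest ih =>
    cases k with
    | zero => simp [bGo]
    | succ k => simpa [bGo] using ih k (by simpa using hk)

theorem le_getLast_of_sorted (l : List Int) (h : l.Pairwise (· ≤ ·)) (a : Int)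
    (ha : a ∈ l) (hne : l ≠ []) : a ≤ l.getLast hne := by
  induction l with
  | nil => exact absurd rfl hne
  | cons b rest ih =>
    cases rest with
    | nil => simp at ha; simp [ha, List.getLast]
    | cons c rs =>
      rw [List.getLast_cons (by simp)]
      rcases List.mem_cons.mp ha with rfl | ha'
      · exact List.rel_of_pairwise_cons h (List.getLast_mem (by simp))
      · exact ih h.of_cons ha' (by simp)

theorem bGo_snd_sorted (s : List Int) : (bGo s).2.Pairwise (· ≤ ·) := by
  induction s with
  | nil => simp [bGo]
  | cons a rest ih =>
    show (bPush (bGo rest).2 a).Pairwise (· ≤ ·)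
    unfold bPush
    split_ifs with h
    · rw [List.pairwise_append]
      refine ⟨ih, by simp, ?_⟩
      intro x hx y hy
      simp only [List.mem_singleton] at hy; subst hy
      have hne : (bGo rest).2 ≠ [] := List.ne_nil_of_mem hx
      rw [List.getLast?_eq_some_getLast hne] at h
      simp only [Option.all_some, decide_eq_true_eq] at h
      exact le_of_lt (lt_of_le_of_lt (le_getLast_of_sorted _ ih x hx hne) h)
    · exact ih

-- find? returns the first index satisfying p
theorem find?_eq_of_getElem {α : Type} (l : List α) (p : α → Bool) (k : Nat)
    (hk : k < l.length) (hp : p l[k] = true)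
    (hmin : ∀ j (hj : j < k), p (l[j]'(lt_trans hj hk)) = false) :
    l.find? p = some l[k] := by
  induction l generalizing k with
  | nil => simp at hk
  | cons a rest ih =>
    cases k with
    | zero => simp_all [List.find?_cons_of_pos]
    | succ k =>
      have h0 : p a = false := hmin 0 (Nat.succ_pos k)
      rw [List.find?_cons_of_neg (by simp [h0])]
      exact ih k (by simpa using hk) (by simpa using hp)
        (fun j hj => hmin (j + 1) (by omega))

-- on a sorted list, bisect_left followed by indexing is 'first element ≥ x'
theorem bisect_find (neg : List Int) (x : Int) (hs : neg.Pairwise (· ≤ ·)) :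
    PySem.List.pyGet? neg ((PySem.List.bisectLeft neg x : Nat) : Int)
      = neg.find? (fun v => decide (x ≤ v)) := by
  obtain ⟨hle, hlt, hge⟩ := PySem.List.bisectLeft_spec neg x hs
  rw [PySem.List.pyGet?_natCast]
  by_cases h : PySem.List.bisectLeft neg x < neg.length
  · rw [List.getElem?_eq_getElem h]
    exact (find?_eq_of_getElem neg _ _ h (by simp [hge _ h (le_refl _)])
      (fun j hj => by simp [Int.not_le.mpr (hlt j (lt_trans hj h) hj)])).symm
  · rw [List.getElem?_eq_none (by omega)]
    symm
    rw [List.find?_eq_none]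
    intro v hv
    obtain ⟨j, hj, rfl⟩ := List.mem_iff_getElem.mp hv
    simp [Int.not_le.mpr (hlt j hj (by omega))]

theorem bAnsOne_eq_find (neg : List Int) (t : Int) (hs : neg.Pairwise (· ≤ ·)) :
    bAnsOne neg t = (neg.find? (fun v => decide (-t ≤ v))).map (fun v => -v) := by
  unfold bAnsOne
  rw [bisect_find neg (-t) hs]

-- the crux: scanning the suffix from the right equals querying the minima stack
theorem findRev_eq (s : List Int) (t : Int) :
    s.reverse.find? (fun v => decide (v ≤ t)) = bAnsOne (bGo s).2 t := by
  induction s with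
  | nil =>
    unfold bAnsOne
    rw [PySem.List.pyGet?_natCast]
    simp [bGo]
  | cons a rest ih =>
    rw [bAnsOne_eq_find _ _ (bGo_snd_sorted (a :: rest))]
    have h2 : (bGo (a :: rest)).2 = bPush (bGo rest).2 a := rfl
    rw [h2, List.reverse_cons, List.find?_append]
    rw [bAnsOne_eq_find _ _ (bGo_snd_sorted rest)] at ih
    unfold bPush
    split_ifs with h
    · rw [List.find?_append]
      cases hf : (bGo rest).2.find? (fun v => decide (-t ≤ v)) with
      | some v =>
        rw [hf] at ih
        rw [ih]; simp
      | none =>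
        rw [hf] at ih
        rw [ih]
        by_cases hat : a ≤ t
        · have h1 : (-t ≤ -a) := by omega
          simp [hat, h1]
        · have h1 : ¬ (-t ≤ -a) := by omega
          simp [hat, h1]
    · cases hf : (bGo rest).2.find? (fun v => decide (-t ≤ v)) with
      | some v =>
        rw [hf] at ih
        rw [ih]; simp
      | none =>
        rw [hf] at ih
        rw [ih]
        have hne : (bGo rest).2 ≠ [] := by
          intro hnil
          rw [hnil] at h; simp at h
        rw [List.getLast?_eq_some_getLast hne] at h
        simp only [Option.all_some, decide_eq_true_eq, not_lt] at h
        have hmlt : ¬ (-t ≤ (bGo rest).2.getLast hne) := by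
          have := List.find?_eq_none.mp hf _ (List.getLast_mem hne)
          simpa using this
        have hna : ¬ (a ≤ t) := by omega
        simp [hna]

-- A's countdown index scan equals the rightmost-match scan over the value suffix
theorem ansAux_eq (arr : List Int) (k : Nat) (hk : k < arr.length) :
    ansAux arr (arr.length : Int) (k : Int)
      = ((arr.drop (k + 1)).reverse).find? (fun v => decide (v ≤ 2 * arr[k])) := by
  unfold ansAux
  have hai : PySem.List.pyGetD arr ((k : Nat) : Int) 0 = arr[k] := by
    rw [PySem.List.pyGetD_eq_getElem arr 0 (by positivity) (by exact_mod_cast hk)]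
    simp
  rw [PySem.List.pyRange_neg_one_eq_reverse]
  have h1 : ((arr.length : Int) - 1) + 1 = (arr.length : Int) := by ring
  have h2 : ((k : Nat) : Int) + 1 = (((k + 1 : Nat)) : Int) := by push_cast; ring
  rw [h1, h2]
  have hmap : (arr.drop (k + 1)).reverse
      = List.map (fun j => PySem.List.pyGetD arr j 0)
          ((PySem.List.pyRange (((k + 1 : Nat)) : Int) (arr.length : Int) 1).reverse) := by
    rw [List.map_reverse]
    rw [PySem.List.map_pyGetD_pyRange' arr 0 (by positivity)]
    simp
  have hpred : (fun j => decide (PySem.List.pyGetD arr ((k : Nat) : Int) 0 * 2 ≥ PySem.List.pyGetD arr j 0))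
      = ((fun v => decide (v ≤ 2 * arr[k])) ∘ fun j => PySem.List.pyGetD arr j 0) := by
    funext j
    simp only [Function.comp_apply, hai, ge_iff_le, decide_eq_decide]
    constructor <;> intro hx <;> omega
  rw [hmap, List.find?_map, hpred]

theorem validMinMax_equiv (arr : List Int) : validMinMax arr = validMinMax_alt arr := by
  have hA : validMinMax arr
      = ((PySem.List.pyRange 0 (arr.length : Int) 1).foldl
          (stepA arr (arr.length : Int)) PySem.Dict.empty).items := rfl
  have hB : validMinMax_alt arr
      = ((arr.zip (bGo arr).1).foldl (fun d p => PySem.Dict.insert d p.1 p.2)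
          PySem.Dict.empty).items := rfl
  rw [hA, hB]
  have hstep : stepA arr (arr.length : Int) = fun d i =>
      PySem.Dict.insert d (PySem.List.pyGetD arr i 0) (ansAux arr (arr.length : Int) i) :=
    funext fun d => funext fun i => stepA_eq arr _ d i
  have hmap : List.map (fun i => (PySem.List.pyGetD arr i 0, ansAux arr (arr.length : Int) i))
      (PySem.List.pyRange 0 (arr.length : Int) 1) = arr.zip (bGo arr).1 := by
    apply List.ext_getElem
    · simp [PySem.List.length_pyRange_one, bGo_fst_length]
    · intro k h1 h2
      have hk : k < arr.length := by
        simpa [PySem.List.length_pyRange_one] using h1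
      simp only [List.getElem_map, List.getElem_zip]
      rw [PySem.List.getElem_pyRange_one]
      have hz : (0 : Int) + (k : Int) = ((k : Nat) : Int) := by ring
      rw [hz]
      have hai : PySem.List.pyGetD arr ((k : Nat) : Int) 0 = arr[k] := by
        rw [PySem.List.pyGetD_eq_getElem arr 0 (by positivity) (by exact_mod_cast hk)]
        simp
      simp only [Prod.mk.injEq]
      refine ⟨hai, ?_⟩
      rw [ansAux_eq arr k hk, findRev_eq]
      exact (bGo_fst_getElem arr k hk).symm
  rw [hstep, ← hmap, List.foldl_map]

-- ===== VERDICT (by name: the statement is the Claim_ definition above) =====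
theorem validMinMax_spec : Claim_equal_validMinMax := by
  intro arr _
  unfold Spec_validMinMax
  exact validMinMax_equiv arr
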